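-- pv_equiv track=rewrite | github.com/ContraKev/nclex-study-tool | generate_peds_exam.py | extract_slides
-- ===== SOURCE A (Python) =====
-- def extract_slides(content):
--     slides = []
--     current = ""
--     for line in content.split('\n'):
--         if line.startswith('=== SLIDE'):
--             if current:
--                 slides.append(current.strip())
--             current = ""
--         else:
--             current += line + " "
--     if current:
--         slides.append(current.strip())
--     return slides
-- ===== SOURCE B (Python) =====
-- def extract_slides(content):
--     # Recursive decomposition: peel off the run up to the first delimiter line,
--     # emit it joined-and-stripped, recurse on the rest; delimiters are skipped.
--     def go(lines):
--         if not lines: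
--             return []
--         if lines[0].startswith('=== SLIDE'):
--             return go(lines[1:])
--         k = next((i for i, l in enumerate(lines) if l.startswith('=== SLIDE')), len(lines))
--         return [' '.join(lines[:k]).strip()] + go(lines[k:])
--     return go(content.split('\n'))
-- ===== Notes on version B (the rewrite author's own statement) =====
-- stated objective: alternative
-- what changed: Replaced the flush-at-delimiter accumulator state machine with a recursive decomposition that peels off each maximal non-delimiter run of lines at once and space-joins it in one call.
import Mathlib
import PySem

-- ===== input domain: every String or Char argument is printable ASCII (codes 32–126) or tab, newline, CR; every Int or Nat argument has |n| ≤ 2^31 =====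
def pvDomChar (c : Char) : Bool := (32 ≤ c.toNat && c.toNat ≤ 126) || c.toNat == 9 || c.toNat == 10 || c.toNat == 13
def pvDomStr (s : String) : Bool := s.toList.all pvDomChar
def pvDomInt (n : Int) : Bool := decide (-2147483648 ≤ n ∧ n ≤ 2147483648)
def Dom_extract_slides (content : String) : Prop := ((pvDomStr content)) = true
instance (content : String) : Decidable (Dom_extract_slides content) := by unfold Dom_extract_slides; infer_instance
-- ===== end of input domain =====

-- B replaces A's flush-at-delimiter accumulator state machine by a recursive
-- decomposition that peels off each maximal non-delimiter run of lines and joins it.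


-- the delimiter prefix '=== SLIDE' both programs test with startswith
def pvMark : List Char := "=== SLIDE".toList

-- ===== PORT A =====
-- one step of A's loop body: flush current on a delimiter line, else extend current
def stepA (st : List String × List Char) (line : List Char) : List String × List Char :=
  if PySem.Chars.startswith line pvMark then
    (if st.2.isEmpty then st.1 else st.1 ++ [String.ofList (PySem.Chars.strip st.2)], [])
  else
    (st.1, st.2 ++ line ++ [' '])

def extract_slides (content : String) : List String :=
  let st := (PySem.Chars.splitOn content.toList "\n".toList).foldl stepA ([], [])
  if st.2.isEmpty then st.1 else st.1 ++ [String.ofList (PySem.Chars.strip st.2)]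

-- ===== PORT B =====
-- B's recursion: skip a leading delimiter line; otherwise split off the maximal
-- run of non-delimiter lines (lines[:k] / lines[k:] with k = first delimiter index),
-- emit it joined with ' ' and stripped, and recurse on the remainder.
def goB (lines : List (List Char)) : List String :=
  match lines with
  | [] => []
  | l :: rest =>
    if PySem.Chars.startswith l pvMark then
      goB rest
    else
      String.ofList (PySem.Chars.strip (PySem.Chars.join [' ']
        ((l :: rest).takeWhile (fun x => !PySem.Chars.startswith x pvMark))))
      :: goB ((l :: rest).dropWhile (fun x => !PySem.Chars.startswith x pvMark))
termination_by lines.length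
decreasing_by
  · simp
  · rename_i h
    rw [List.dropWhile_cons_of_pos (by simp [h])]
    exact Nat.lt_succ_of_le (List.length_dropWhile_le _ _)

def extract_slides_alt (content : String) : List String :=
  goB (PySem.Chars.splitOn content.toList "\n".toList)

-- ===== PRECONDITION & SPEC =====
def Spec_extract_slides (content : String) (out : List String) : Prop := out = extract_slides_alt content
instance (content : String) (out : List String) : Decidable (Spec_extract_slides content out) := by unfold Spec_extract_slides; infer_instance

-- ===== CLAIM (what is proved, stated in full; the proofs are below) =====
def Claim_equal_extract_slides : Prop := ∀ (content : String), Dom_extract_slides content → Spec_extract_slides content (extract_slides content)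

-- ===== LEMMAS AND PROOFS =====

-- the functional (output-in-front) reading of A's loop + final flush
def emit : List (List Char) → List Char → List String
  | [], cur => if cur.isEmpty then [] else [String.ofList (PySem.Chars.strip cur)]
  | l :: rest, cur =>
    if PySem.Chars.startswith l pvMark then
      (if cur.isEmpty then [] else [String.ofList (PySem.Chars.strip cur)]) ++ emit rest []
    else
      emit rest (cur ++ l ++ [' '])

-- the shape A's `current` always has: each seen line followed by one space
def flat (pre : List (List Char)) : List Char := (pre.map (· ++ [' '])).flatten

lemma goB_nil : goB [] = [] := by rw [goB]

lemma goB_cons_delim {l : List Char} {rest : List (List Char)}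
    (h : PySem.Chars.startswith l pvMark = true) : goB (l :: rest) = goB rest := by
  rw [goB, if_pos h]

lemma goB_cons_run {l : List Char} {rest : List (List Char)}
    (h : PySem.Chars.startswith l pvMark = false) :
    goB (l :: rest) =
      String.ofList (PySem.Chars.strip (PySem.Chars.join [' ']
        (l :: rest.takeWhile (fun x => !PySem.Chars.startswith x pvMark))))
      :: goB (rest.dropWhile (fun x => !PySem.Chars.startswith x pvMark)) := by
  rw [goB, if_neg (by simp [h])]
  rw [List.takeWhile_cons_of_pos (by simp [h]), List.dropWhile_cons_of_pos (by simp [h])]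

lemma fold_emit (lines : List (List Char)) : ∀ s cur,
    (fun st : List String × List Char =>
      if st.2.isEmpty then st.1 else st.1 ++ [String.ofList (PySem.Chars.strip st.2)])
      (lines.foldl stepA (s, cur)) = s ++ emit lines cur := by
  induction lines with
  | nil => intro s cur; by_cases h : cur.isEmpty <;> simp [emit, h]
  | cons l rest ih =>
    intro s cur
    simp only [List.foldl_cons, stepA, emit]
    by_cases hP : PySem.Chars.startswith l pvMark <;>
      by_cases hc : cur.isEmpty <;>
        simp only [hP, hc, Bool.false_eq_true, if_true, if_false]
    · simpa using ih s []
    · simpa using ih (s ++ [String.ofList (PySem.Chars.strip cur)]) []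
    · simpa using ih s (cur ++ (l ++ [' ']))
    · simpa using ih s (cur ++ (l ++ [' ']))

lemma rstrip_append_space (xs : List Char) :
    PySem.Chars.rstrip (xs ++ [' ']) = PySem.Chars.rstrip xs := by
  simp [PySem.Chars.rstrip, show PySem.Chars.isspace ' ' = true by decide]

lemma strip_append_space (xs : List Char) :
    PySem.Chars.strip (xs ++ [' ']) = PySem.Chars.strip xs := by
  simp only [PySem.Chars.strip, PySem.Chars.lstrip, List.dropWhile_append]
  by_cases h : (List.dropWhile PySem.Chars.isspace xs).isEmpty
  · simp [List.isEmpty_iff.mp h,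
      show List.dropWhile PySem.Chars.isspace [' '] = [] by decide, PySem.Chars.rstrip]
  · simp [h, rstrip_append_space]

lemma flat_append_singleton (pre : List (List Char)) (l : List Char) :
    flat (pre ++ [l]) = flat pre ++ (l ++ [' ']) := by simp [flat]

lemma flat_not_empty (pre : List (List Char)) (h : pre ≠ []) : (flat pre).isEmpty = false := by
  cases pre with
  | nil => exact absurd rfl h
  | cons p ps => simp [flat]

lemma flat_eq_join_append (pre : List (List Char)) (h : pre ≠ []) :
    flat pre = PySem.Chars.join [' '] pre ++ [' '] := by
  induction pre with
  | nil => exact absurd rfl h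
  | cons p ps ih =>
    cases ps with
    | nil => simp [flat, PySem.Chars.join_singleton]
    | cons q qs =>
      rw [PySem.Chars.join_cons_cons]
      have hstep : flat (p :: q :: qs) = (p ++ [' ']) ++ flat (q :: qs) := by simp [flat]
      rw [hstep, ih (by simp)]
      simp

lemma strip_flat (pre : List (List Char)) (h : pre ≠ []) :
    PySem.Chars.strip (flat pre) = PySem.Chars.strip (PySem.Chars.join [' '] pre) := by
  rw [flat_eq_join_append pre h, strip_append_space]

lemma emit_goB (n : Nat) : ∀ lines : List (List Char), lines.length ≤ n →
    emit lines [] = goB lines ∧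
    ∀ pre, pre ≠ [] → emit lines (flat pre) =
      String.ofList (PySem.Chars.strip
        (flat (pre ++ lines.takeWhile (fun x => !PySem.Chars.startswith x pvMark))))
      :: goB (lines.dropWhile (fun x => !PySem.Chars.startswith x pvMark)) := by
  induction n with
  | zero =>
    intro lines hl
    have h0 : lines = [] := List.length_eq_zero_iff.mp (Nat.le_zero.mp hl)
    subst h0
    refine ⟨by simp [emit, goB_nil], ?_⟩
    intro pre hpre
    simp [emit, goB_nil, flat_not_empty pre hpre]
  | succ n ih =>
    intro lines hl
    cases lines with
    | nil =>
      refine ⟨by simp [emit, goB_nil], ?_⟩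
      intro pre hpre
      simp [emit, goB_nil, flat_not_empty pre hpre]
    | cons l rest =>
      have hr : rest.length ≤ n := by simpa using hl
      by_cases hP : PySem.Chars.startswith l pvMark
      · constructor
        · rw [goB_cons_delim hP]
          simpa [emit, hP] using (ih rest hr).1
        · intro pre hpre
          rw [List.takeWhile_cons_of_neg (by simp [hP]),
            List.dropWhile_cons_of_neg (by simp [hP]), goB_cons_delim hP,
            List.append_nil]
          simp [emit, hP, flat_not_empty pre hpre, (ih rest hr).1]
      · have hP' : PySem.Chars.startswith l pvMark = false := by simpa using hP
        constructor
        · have hrec := (ih rest hr).2 [l] (by simp)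
          have hf : ([] : List Char) ++ l ++ [' '] = flat [l] := by simp [flat]
          rw [goB_cons_run hP']
          simp only [emit, hP', Bool.false_eq_true, if_false]
          rw [hf, hrec, strip_flat _ (by simp)]
          simp
        · intro pre hpre
          have hrec := (ih rest hr).2 (pre ++ [l]) (by simp)
          rw [List.takeWhile_cons_of_pos (by simp [hP']),
            List.dropWhile_cons_of_pos (by simp [hP'])]
          simp only [emit, hP', Bool.false_eq_true, if_false]
          rw [show flat pre ++ l ++ [' '] = flat pre ++ (l ++ [' ']) by simp,
            ← flat_append_singleton, hrec]
          simp

-- ===== VERDICT (by name: the statement is the Claim_ definition above) =====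
theorem extract_slides_spec : Claim_equal_extract_slides := by
  intro content _
  unfold Spec_extract_slides extract_slides extract_slides_alt
  have h1 := fold_emit (PySem.Chars.splitOn content.toList "\n".toList) [] []
  rw [(emit_goB (PySem.Chars.splitOn content.toList "\n".toList).length
    (PySem.Chars.splitOn content.toList "\n".toList) le_rfl).1] at h1
  simpa using h1
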